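-- pv_equiv track=rewrite | github.com/FilipGredecki/Horner-s-diagram | zadania/horner.py | horner
-- ===== SOURCE A (Python) =====
-- def horner(coefs, sqrt):
--     """
--     performs the horner diagram
--     """
--     new_coef = [coefs[0]]
--     for i in range(len(coefs)-1):
--         nw = new_coef[i] * sqrt + coefs[i+1]
--         new_coef.append(nw)
--     if new_coef[-1] == 0:
--         new_coef.pop()
--     return new_coef
-- ===== SOURCE B (Python) =====
-- def horner(coefs, sqrt):
--     """
--     Horner diagram by divide and conquer: the intermediate values of a
--     concatenation L+R are the values of L followed by the standalone values
--     of R each shifted by last(L) * sqrt**(k+1) (Horner values are affine in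
--     the incoming accumulator), so each half is solved independently and the
--     halves are merged with a running power of sqrt.
--     """
--     def solve(cs):
--         if len(cs) == 1:
--             return cs[:]
--         mid = len(cs) // 2
--         out = solve(cs[:mid])
--         carry = out[-1] * sqrt
--         for u in solve(cs[mid:]):
--             out.append(u + carry)
--             carry *= sqrt
--         return out
--     vals = solve(coefs)
--     if vals[-1] == 0:
--         vals.pop()
--     return vals
-- ===== Notes on version B (the rewrite author's own statement) =====
-- stated objective: alternative
-- what changed: B replaces A's left-to-right index loop by recursive divide and conquer: each half of the coefficient list is solved standalone and the right half's values are merged in by adding last(left)*sqrt**(k+1) via a running power carry, exploiting that Horner intermediate values are affine in the incoming accumulator.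
import Mathlib
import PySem

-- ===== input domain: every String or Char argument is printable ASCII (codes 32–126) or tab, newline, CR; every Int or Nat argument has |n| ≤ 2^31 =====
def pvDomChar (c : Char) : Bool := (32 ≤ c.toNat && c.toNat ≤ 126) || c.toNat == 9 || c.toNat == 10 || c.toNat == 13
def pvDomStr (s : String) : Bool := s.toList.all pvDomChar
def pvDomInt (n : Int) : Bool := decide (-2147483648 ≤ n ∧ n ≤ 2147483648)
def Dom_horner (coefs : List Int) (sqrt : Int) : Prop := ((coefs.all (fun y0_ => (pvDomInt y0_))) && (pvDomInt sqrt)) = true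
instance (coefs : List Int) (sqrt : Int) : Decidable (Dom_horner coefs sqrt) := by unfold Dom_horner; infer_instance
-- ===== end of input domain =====

-- B replaces A's sequential index loop by divide and conquer: each half is solved standalone and merged with a geometric carry (alternative algorithm, similar cost).


-- ===== PORT A =====
-- A: seed new_coef with coefs[0]; for i in range(len(coefs)-1) append new_coef[i]*sqrt + coefs[i+1];
-- pop the last element if it is 0.  (pyGetD's default is only reachable off Pre_.)
def horner (coefs : List Int) (sqrt : Int) : List Int :=
  let new_coef :=
    (PySem.List.pyRange 0 ((coefs.length : Int) - 1) 1).foldl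
      (fun acc i =>
        acc ++ [PySem.List.pyGetD acc i 0 * sqrt + PySem.List.pyGetD coefs (i + 1) 0])
      [PySem.List.pyGetD coefs 0 0]
  if PySem.List.pyGetD new_coef (-1) 0 = 0 then new_coef.dropLast else new_coef

-- ===== PORT B =====
-- B: divide and conquer.  solve(cs): if len(cs)==1 return a copy; else solve each half and
-- append the right half's standalone values shifted by a carry = last(left)*sqrt, carry *= sqrt.
-- Python's `len(cs) == 1` test is ported as `length ≤ 1`: solve is only reached on nonempty
-- lists (on [] the Python recursion never returns; [] is outside Pre_).
def hsolve (s : Int) (cs : List Int) : List Int :=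
  if cs.length ≤ 1 then cs
  else
    let mid := cs.length / 2
    let out := hsolve s (cs.take mid)
    let carry := PySem.List.pyGetD out (-1) 0 * s
    ((hsolve s (cs.drop mid)).foldl
        (fun (p : List Int × Int) u => (p.1 ++ [u + p.2], p.2 * s)) (out, carry)).1
termination_by cs.length
decreasing_by
  · simp; omega
  · simp; omega

def horner_alt (coefs : List Int) (sqrt : Int) : List Int :=
  let vals := hsolve sqrt coefs
  if PySem.List.pyGetD vals (-1) 0 = 0 then vals.dropLast else vals

-- ===== PRECONDITION & SPEC =====
-- Pre_ excludes only the empty list, on which A raises IndexError (coefs[0]); B raises there too (out[-1]).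
def Pre_horner (coefs : List Int) (sqrt : Int) : Prop := coefs ≠ []
instance (coefs : List Int) (sqrt : Int) : Decidable (Pre_horner coefs sqrt) := by unfold Pre_horner; infer_instance
def pvWitness_horner : List Int × Int := ([1, -3, 2], 1)

def Spec_horner (coefs : List Int) (sqrt : Int) (out : List Int) : Prop := out = horner_alt coefs sqrt
instance (coefs : List Int) (sqrt : Int) (out : List Int) : Decidable (Spec_horner coefs sqrt out) := by unfold Spec_horner; infer_instance

-- ===== CLAIM (what is proved, stated in full; the proofs are below) =====
def Claim_equal_horner : Prop := ∀ (coefs : List Int) (sqrt : Int), Dom_horner coefs sqrt → Pre_horner coefs sqrt → Spec_horner coefs sqrt (horner coefs sqrt)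

-- ===== LEMMAS AND PROOFS =====

-- common reference: the Horner values produced after accumulator a over the remaining coefficients
def accumTail (s a : Int) : List Int → List Int
  | [] => []
  | c :: t => (a * s + c) :: accumTail s (a * s + c) t

-- standalone Horner values (seed = first coefficient)
def sv (s : Int) : List Int → List Int
  | [] => []
  | c :: t => c :: accumTail s c t

-- the merge loop's effect: add a geometric carry e, e*s, e*s^2, … elementwise
def shiftBy (s e : Int) : List Int → List Int
  | [] => []
  | u :: us => (u + e) :: shiftBy s (e * s) us

theorem accumTail_zero (s : Int) (cs : List Int) : accumTail s 0 cs = sv s cs := by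
  cases cs with
  | nil => rfl
  | cons c t => simp [accumTail, sv]

theorem accumTail_shift (s : Int) :
    ∀ (t : List Int) (a d : Int), accumTail s (a + d) t = shiftBy s (d * s) (accumTail s a t) := by
  intro t
  induction t with
  | nil => intro a d; rfl
  | cons c t ih =>
    intro a d
    show ((a + d) * s + c) :: accumTail s ((a + d) * s + c) t
        = (a * s + c + d * s) :: shiftBy s (d * s * s) (accumTail s (a * s + c) t)
    have h1 : (a + d) * s + c = (a * s + c) + d * s := by ring
    rw [h1, ih (a * s + c) (d * s)]

theorem accumTail_append (s : Int) :
    ∀ (l r : List Int) (a : Int),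
      accumTail s a (l ++ r)
        = accumTail s a l ++ accumTail s ((accumTail s a l).getLastD a) r := by
  intro l
  induction l with
  | nil => intro r a; simp [accumTail]
  | cons c l ih =>
    intro r a
    show (a * s + c) :: accumTail s (a * s + c) (l ++ r) = _
    rw [ih r (a * s + c)]
    simp only [accumTail, List.cons_append]
    generalize accumTail s (a * s + c) l = X
    cases X with
    | nil => simp
    | cons u us =>
      obtain ⟨y, hy⟩ := Option.isSome_iff_exists.mp
        (List.getLast?_isSome.mpr (List.cons_ne_nil u us))
      simp [hy]

theorem foldl_shift (s : Int) :
    ∀ (us out : List Int) (e : Int),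
      (us.foldl (fun (p : List Int × Int) u => (p.1 ++ [u + p.2], p.2 * s)) (out, e)).1
        = out ++ shiftBy s e us := by
  intro us
  induction us with
  | nil => intro out e; simp [shiftBy]
  | cons u us ih =>
    intro out e
    simp only [List.foldl_cons]
    rw [ih (out ++ [u + e]) (e * s)]
    simp [shiftBy]

theorem getLast_cons_eq_getLastD (c : Int) :
    ∀ (xs : List Int) (h : (c :: xs) ≠ []), (c :: xs).getLast h = xs.getLastD c := by
  intro xs
  induction xs generalizing c with
  | nil => intro h; rfl
  | cons u us ih => intro h; rw [List.getLast_cons (by simp), ih u (by simp), List.getLastD_cons]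

theorem hsolve_eq (s : Int) :
    ∀ (n : Nat) (cs : List Int), cs.length = n → cs ≠ [] → hsolve s cs = sv s cs := by
  intro n
  induction n using Nat.strong_induction_on with
  | _ n ih =>
    intro cs hn hne
    by_cases hle : cs.length ≤ 1
    · -- length 1 (0 is excluded by hne)
      rw [hsolve, if_pos hle]
      obtain ⟨c, t, rfl⟩ : ∃ c t, cs = c :: t := by
        cases cs with
        | nil => exact absurd rfl hne
        | cons c t => exact ⟨c, t, rfl⟩
      have : t = [] := by
        cases t with
        | nil => rfl
        | cons _ _ => simp at hle
      subst this
      simp [sv, accumTail]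
    · rw [hsolve, if_neg hle]
      show (List.foldl (fun (p : List Int × Int) u => (p.1 ++ [u + p.2], p.2 * s))
            (hsolve s (List.take (cs.length / 2) cs),
             PySem.List.pyGetD (hsolve s (List.take (cs.length / 2) cs)) (-1) 0 * s)
            (hsolve s (List.drop (cs.length / 2) cs))).1 = sv s cs
      have hlen : 2 ≤ cs.length := by omega
      have hmid1 : 1 ≤ cs.length / 2 := by omega
      have hmidlt : cs.length / 2 < cs.length := by omega
      have htake : (cs.take (cs.length / 2)).length = cs.length / 2 := by
        simp; omega
      have hdrop : (cs.drop (cs.length / 2)).length = cs.length - cs.length / 2 := by simp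
      have htne : cs.take (cs.length / 2) ≠ [] := by
        intro h; rw [h] at htake; simp at htake; omega
      have hdne : cs.drop (cs.length / 2) ≠ [] := by
        intro h; rw [h] at hdrop; simp at hdrop; omega
      rw [ih (cs.take (cs.length / 2)).length (by omega) _ rfl htne,
          ih (cs.drop (cs.length / 2)).length (by omega) _ rfl hdne,
          foldl_shift]
      -- name the two halves
      obtain ⟨c, t, hct⟩ : ∃ c t, cs.take (cs.length / 2) = c :: t := by
        cases h : cs.take (cs.length / 2) with
        | nil => exact absurd h htne
        | cons c t => exact ⟨c, t, rfl⟩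
      have hsplit : cs = (c :: t) ++ cs.drop (cs.length / 2) := by
        rw [← hct, List.take_append_drop]
      rw [hct]
      conv_rhs => rw [hsplit]
      set r := cs.drop (cs.length / 2) with hr
      have hlast : PySem.List.pyGetD (sv s (c :: t)) (-1) 0
          = (accumTail s c t).getLastD c := by
        rw [PySem.List.pyGetD_neg_one (sv s (c :: t)) 0 (by simp [sv])]
        show (c :: accumTail s c t).getLast _ = _
        rw [getLast_cons_eq_getLastD]
      rw [hlast]
      show (c :: accumTail s c t) ++ shiftBy s ((accumTail s c t).getLastD c * s) (sv s r)
          = sv s ((c :: t) ++ r)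
      have hrhs : sv s ((c :: t) ++ r) = c :: accumTail s c (t ++ r) := rfl
      rw [hrhs, accumTail_append s t r c]
      have hshift : accumTail s ((accumTail s c t).getLastD c) r
          = shiftBy s ((accumTail s c t).getLastD c * s) (sv s r) := by
        have := accumTail_shift s r 0 ((accumTail s c t).getLastD c)
        rw [zero_add, accumTail_zero] at this
        exact this
      rw [hshift]
      simp

-- A's index loop: invariant over the remaining indices
theorem a_loop_eq (coefs : List Int) (s : Int) :
    ∀ (t : List Int) (acc : List Int) (a : Int),
      acc.getLast? = some a →
      coefs.drop acc.length = t →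
      (PySem.List.pyRange ((acc.length : Int) - 1) ((coefs.length : Int) - 1) 1).foldl
          (fun acc2 i =>
            acc2 ++ [PySem.List.pyGetD acc2 i 0 * s + PySem.List.pyGetD coefs (i + 1) 0])
          acc
        = acc ++ accumTail s a t := by
  intro t
  induction t with
  | nil =>
    intro acc a _ hdrop
    have hle : coefs.length ≤ acc.length := by
      by_contra h
      have := List.drop_eq_nil_iff.mp hdrop
      omega
    rw [PySem.List.pyRange_one_eq_nil (by omega)]
    simp [accumTail]
  | cons c t ih =>
    intro acc a hlast hdrop
    have hne : acc ≠ [] := by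
      intro h; rw [h] at hlast; simp at hlast
    have hlen : 0 < acc.length := List.length_pos_iff.mpr hne
    have hlt : acc.length < coefs.length := by
      by_contra h
      rw [List.drop_eq_nil_of_le (by omega)] at hdrop
      exact (List.cons_ne_nil c t) hdrop.symm
    rw [PySem.List.pyRange_one_cons (by omega)]
    simp only [List.foldl_cons]
    have hget_acc : PySem.List.pyGetD acc ((acc.length : Int) - 1) 0 = a := by
      have h1 : ((acc.length : Int) - 1) = ((acc.length - 1 : Nat) : Int) := by omega
      rw [h1, PySem.List.pyGetD_natCast]
      rw [List.getLast?_eq_getElem?] at hlast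
      simp [List.getD, hlast]
    have hget_c : PySem.List.pyGetD coefs ((acc.length : Int) - 1 + 1) 0 = c := by
      have h1 : ((acc.length : Int) - 1 + 1) = ((acc.length : Nat) : Int) := by omega
      rw [h1, PySem.List.pyGetD_natCast]
      have : coefs[acc.length]? = some c := by
        have := congrArg List.head? hdrop
        rwa [List.head?_drop] at this
      simp [List.getD, this]
    rw [hget_acc, hget_c]
    have hstep : ((acc.length : Int) - 1) + 1 = (((acc ++ [a * s + c]).length : Int) - 1) := by
      simp only [List.length_append, List.length_cons, List.length_nil]
      omega
    rw [hstep, ih (acc ++ [a * s + c]) (a * s + c) (by simp) (by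
      simp only [List.length_append, List.length_cons, List.length_nil]
      have := congrArg List.tail hdrop
      rw [List.tail_drop] at this
      simpa using this)]
    simp [accumTail]

-- ===== VERDICT (by name: the statement is the Claim_ definition above) =====
theorem horner_spec : Claim_equal_horner := by
  intro coefs s _ hpre
  unfold Spec_horner horner horner_alt
  obtain ⟨c, t, rfl⟩ : ∃ c t, coefs = c :: t := by
    cases coefs with
    | nil => exact absurd rfl hpre
    | cons c t => exact ⟨c, t, rfl⟩
  have hA := a_loop_eq (c :: t) s t [c] c (by simp) (by simp)
  simp only [List.length_cons, List.length_nil] at hA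
  have h01 : ((0 + 1 : Nat) : Int) - 1 = (0 : Int) := by norm_num
  rw [h01] at hA
  simp only [PySem.List.pyGetD_zero_cons, List.length_cons]
  rw [hA]
  rw [hsolve_eq s (c :: t).length (c :: t) rfl (by simp)]
  simp [sv]
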